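-- pv_equiv track=rewrite | github.com/skezzy1/Programming-2-course-V-4 | python5.py | calculate_y
-- ===== SOURCE A (Python) =====
-- def calculate_y(arr):
--     n = len(arr)
--     m = n - 1
--     y = 0
--     product = 1
--     for i in range(n):
--         if arr[i] < 0:
--             m = i
--             break
--         product *= arr[i]
--         y += product
--     return y, m
-- ===== SOURCE B (Python) =====
-- def calculate_y(arr):
--     # Right-to-left Horner pass: y = x*(1+y) uses a0+a0*a1+... = a0*(1+a1*(1+...));
--     # a negative element resets the state, so only the suffix-free prefix survives.
--     y, m = 0, -1
--     for x in reversed(arr):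
--         if x < 0:
--             y, m = 0, 0
--         else:
--             y, m = x * (1 + y), m + 1
--     return y, m
-- ===== Notes on version B (the rewrite author's own statement) =====
-- stated objective: alternative
-- what changed: A scans left-to-right keeping a running prefix product and sum with a break at the first negative; B makes one right-to-left Horner pass (y = x*(1+y)) with a reset on negatives, so no product accumulator, no index and no break exist.
import Mathlib
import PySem

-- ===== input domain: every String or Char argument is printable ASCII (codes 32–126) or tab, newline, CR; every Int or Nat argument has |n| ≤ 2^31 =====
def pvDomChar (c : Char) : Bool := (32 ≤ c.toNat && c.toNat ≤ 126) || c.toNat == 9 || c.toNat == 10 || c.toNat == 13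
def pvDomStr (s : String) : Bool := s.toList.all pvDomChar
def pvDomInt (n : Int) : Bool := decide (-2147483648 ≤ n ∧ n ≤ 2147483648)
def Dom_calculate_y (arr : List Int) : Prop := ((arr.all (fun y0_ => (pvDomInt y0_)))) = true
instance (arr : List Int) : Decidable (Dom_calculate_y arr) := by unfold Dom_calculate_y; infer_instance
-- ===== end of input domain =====

-- B replaces A's left-to-right running-product loop with a right-to-left Horner pass (alternative algorithm, same cost).

-- ===== PORT A =====
-- A's indexed for-loop with break, carrying (y, product); m defaults to n-1, becomes i at the first negative.
def goA (n : Int) : List Int → Nat → Int → Int → Int × Int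
  | [], _, y, _ => (y, n - 1)
  | a :: rest, i, y, product =>
    if a < 0 then (y, (i : Int))
    else goA n rest (i + 1) (y + product * a) (product * a)

def calculate_y (arr : List Int) : Int × Int :=
  goA (arr.length : Int) arr 0 0 1

-- ===== PORT B =====
-- one step of B's loop body: reset on a negative, Horner update otherwise
def stepB (st : Int × Int) (x : Int) : Int × Int :=
  if x < 0 then (0, 0) else (x * (1 + st.1), st.2 + 1)

-- 'for x in reversed(arr)' over state (y, m) starting from (0, -1)
def calculate_y_alt (arr : List Int) : Int × Int :=
  arr.reverse.foldl stepB (0, -1)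

-- ===== PRECONDITION & SPEC =====
def Spec_calculate_y (arr : List Int) (out : Int × Int) : Prop := out = calculate_y_alt arr
instance (arr : List Int) (out : Int × Int) : Decidable (Spec_calculate_y arr out) := by unfold Spec_calculate_y; infer_instance

-- ===== CLAIM =====
def Claim_equal_calculate_y : Prop := ∀ (arr : List Int), Dom_calculate_y arr → Spec_calculate_y arr (calculate_y arr)

-- ===== LEMMAS AND PROOFS =====
-- index of the first negative element, or the length if none (proof-only helper)
def firstNeg : List Int → Nat
  | [] => 0
  | x :: t => if x < 0 then 0 else firstNeg t + 1

-- B as a structural foldr (foldl over the reverse)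
def bFold (l : List Int) : Int × Int := l.foldr (fun x st => stepB st x) (0, -1)

theorem alt_eq_bFold (arr : List Int) : calculate_y_alt arr = bFold arr := by
  simp [calculate_y_alt, bFold, List.foldl_reverse]

theorem bFold_snd (t : List Int) :
    (bFold t).2 = if firstNeg t < t.length then (firstNeg t : Int) else (t.length : Int) - 1 := by
  induction t with
  | nil => simp [bFold, firstNeg]
  | cons a t ih =>
    by_cases ha : a < 0
    · simp [bFold, firstNeg, stepB, ha]
    · simp only [bFold, List.foldr_cons, firstNeg, ha, if_false, stepB] at *
      have hlt : (firstNeg t + 1 < t.length + 1) ↔ (firstNeg t < t.length) := by omega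
      simp only [List.length_cons, hlt, ih]
      split_ifs with h
      · push_cast; ring
      · push_cast; ring

theorem goA_eq (l : List Int) : ∀ (n : Int) (i : Nat) (y p : Int),
    goA n l i y p
      = (y + p * (bFold l).1,
         if firstNeg l < l.length then ((i : Int) + (firstNeg l : Int)) else n - 1) := by
  induction l with
  | nil =>
    intro n i y p
    simp [goA, firstNeg, bFold]
  | cons a t ih =>
    intro n i y p
    by_cases ha : a < 0
    · simp [goA, firstNeg, bFold, stepB, ha]
    · simp only [goA, ha, if_false, ih n (i + 1) (y + p * a) (p * a),
        firstNeg, bFold, List.foldr_cons, stepB, Prod.mk.injEq]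
      refine ⟨by ring, ?_⟩
      have hlt : (firstNeg t + 1 < t.length + 1) ↔ (firstNeg t < t.length) := by omega
      simp only [List.length_cons, hlt]
      split_ifs with h
      · push_cast; ring
      · rfl

-- ===== VERDICT =====
theorem calculate_y_spec : Claim_equal_calculate_y := by
  intro arr _
  unfold Spec_calculate_y calculate_y
  rw [alt_eq_bFold, goA_eq]
  have h2 := bFold_snd arr
  cases hb : bFold arr with
  | mk y m =>
    simp only [hb] at h2 ⊢
    simp only [zero_add, one_mul, Prod.mk.injEq]
    exact ⟨trivial, by rw [h2]; split_ifs with h <;> simp⟩
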